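-- pv_equiv track=rewrite | github.com/ABIRxAI/email-triage-openenv | env/utils.py | has_urgent_tone
-- ===== SOURCE A (Python) =====
-- def has_urgent_tone(email):
--     """Check if email sounds urgent"""
--     text = (email["subject"] + " " + email["body"]).lower()
--
--     urgent_words = [
--         "immediately",
--         "asap",
--         "urgent",
--         "now",
--         "within 1 hour"
--     ]
--
--     return any(word in text for word in urgent_words)
-- ===== SOURCE B (Python) =====
-- def has_urgent_tone(email):
--     """Check if email sounds urgent"""
--     raw = email["subject"] + " " + email["body"]
--     n = len(raw)
--     words = ("immediately", "asap", "urgent", "now", "within 1 hour")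
--     for i in range(n):
--         for w in words:
--             if i + len(w) <= n and all(raw[i + j].lower() == w[j] for j in range(len(w))):
--                 return True
--     return False
-- ===== Notes on version B (the rewrite author's own statement) =====
-- stated objective: alternative
-- what changed: Instead of lowercasing the whole text once and running five independent whole-text substring searches (any(word in text)), B scans the raw text left to right once and at each position compares each keyword character by character, lowercasing characters on the fly; no whole-string lower() and no 'in' searches.
import Mathlib
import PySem

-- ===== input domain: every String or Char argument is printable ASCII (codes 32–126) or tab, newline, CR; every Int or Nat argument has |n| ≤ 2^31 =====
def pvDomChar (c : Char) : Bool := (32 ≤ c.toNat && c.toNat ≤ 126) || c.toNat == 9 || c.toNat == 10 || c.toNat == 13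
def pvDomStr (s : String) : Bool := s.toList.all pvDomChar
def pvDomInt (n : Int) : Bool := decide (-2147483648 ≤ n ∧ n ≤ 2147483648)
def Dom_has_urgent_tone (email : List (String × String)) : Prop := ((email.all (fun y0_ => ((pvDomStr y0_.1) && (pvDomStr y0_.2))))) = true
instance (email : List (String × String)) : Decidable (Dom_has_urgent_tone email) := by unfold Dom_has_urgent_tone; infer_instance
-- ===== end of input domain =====

-- B scans the raw text once, comparing keywords character by character with on-the-fly lowercasing, instead of A's whole-text lower() plus five independent substring searches (alternative decomposition, no speed claim).


-- ===== PORT A =====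
-- the literal keyword list A carries
def pvUrgentWords : List (List Char) :=
  ["immediately".toList, "asap".toList, "urgent".toList, "now".toList, "within 1 hour".toList]

-- text = (email["subject"] + " " + email["body"]).lower() (dict lookup = first match)
def pvUrgentText (email : List (String × String)) : List Char :=
  PySem.Chars.lower
    ((((email.find? (fun kv => kv.1 == "subject")).map (·.2)).getD "").toList
      ++ " ".toList
      ++ (((email.find? (fun kv => kv.1 == "body")).map (·.2)).getD "").toList)

-- any(word in text for word in urgent_words)
def has_urgent_tone (email : List (String × String)) : Bool :=
  pvUrgentWords.any (fun w => PySem.Chars.isIn w (pvUrgentText email))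

-- ===== PORT B =====
-- all(raw[i + j].lower() == w[j] for j in range(len(w)))  (with the i+len(w) <= n bound check)
def bMatchAt : List Char → List Char → Bool
  | _, [] => true
  | [], _ :: _ => false
  | c :: s, w :: ws => (PySem.Chars.lowerChar c == w) && bMatchAt s ws

-- for i in range(n): for w in words: if <match at i>: return True
def bScan : List Char → Bool
  | [] => false
  | c :: rest =>
      bMatchAt (c :: rest) "immediately".toList
        || bMatchAt (c :: rest) "asap".toList
        || bMatchAt (c :: rest) "urgent".toList
        || bMatchAt (c :: rest) "now".toList
        || bMatchAt (c :: rest) "within 1 hour".toList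
        || bScan rest

def has_urgent_tone_alt (email : List (String × String)) : Bool :=
  bScan
    ((((email.find? (fun kv => kv.1 == "subject")).map (·.2)).getD "").toList
      ++ ' ' :: (((email.find? (fun kv => kv.1 == "body")).map (·.2)).getD "").toList)

-- ===== PRECONDITION & SPEC =====
-- Pre_ excludes exactly the inputs where email["subject"] or email["body"] raises KeyError (both A and B raise there).
def Pre_has_urgent_tone (email : List (String × String)) : Prop :=
  (email.find? (fun kv => kv.1 == "subject")).isSome ∧ (email.find? (fun kv => kv.1 == "body")).isSome
instance (email : List (String × String)) : Decidable (Pre_has_urgent_tone email) := by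
  unfold Pre_has_urgent_tone; infer_instance
def pvWitness_has_urgent_tone : (List (String × String)) := [("subject", "hello"), ("body", "see you now")]

def Spec_has_urgent_tone (email : List (String × String)) (out : Bool) : Prop := out = has_urgent_tone_alt email
instance (email : List (String × String)) (out : Bool) : Decidable (Spec_has_urgent_tone email out) := by unfold Spec_has_urgent_tone; infer_instance

-- ===== CLAIM =====
def Claim_equal_has_urgent_tone : Prop := ∀ (email : List (String × String)), Dom_has_urgent_tone email → Pre_has_urgent_tone email → Spec_has_urgent_tone email (has_urgent_tone email)

-- ===== LEMMAS AND PROOFS =====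

-- lower is the per-character map
lemma lower_eq_map (s : List Char) : PySem.Chars.lower s = s.map PySem.Chars.lowerChar := rfl

-- B's char-by-char comparison with on-the-fly lowering = 'w is a prefix of the lowered text'
lemma bMatchAt_eq_startswith (w s : List Char) :
    bMatchAt s w = PySem.Chars.startswith (s.map PySem.Chars.lowerChar) w := by
  induction w generalizing s with
  | nil => cases s <;> simp [bMatchAt, PySem.Chars.startswith]
  | cons x xs ih =>
      cases s with
      | nil =>
          rw [Bool.eq_iff_iff]
          simp [bMatchAt, PySem.Chars.startswith_iff]
      | cons c rest =>
          rw [bMatchAt, ih, Bool.eq_iff_iff]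
          simp only [Bool.and_eq_true, beq_iff_eq, PySem.Chars.startswith_iff,
            List.map_cons, List.cons_prefix_cons]
          exact ⟨fun ⟨h1, h2⟩ => ⟨h1.symm, h2⟩, fun ⟨h1, h2⟩ => ⟨h1.symm, h2⟩⟩

-- 'w in c::rest' splits into 'starts here' or 'w in rest'
lemma isIn_cons (w : List Char) (c : Char) (rest : List Char) :
    PySem.Chars.isIn w (c :: rest)
      = (PySem.Chars.startswith (c :: rest) w || PySem.Chars.isIn w rest) := by
  rw [Bool.eq_iff_iff]
  simp [PySem.Chars.isIn_iff_infix, PySem.Chars.startswith_iff, List.infix_cons_iff]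

-- B's scan of the raw text = A's five substring searches over the lowered text
lemma bScan_eq_any (s : List Char) :
    bScan s = pvUrgentWords.any (fun w => PySem.Chars.isIn w (s.map PySem.Chars.lowerChar)) := by
  induction s with
  | nil => decide
  | cons c rest ih =>
      rw [bScan, ih]
      simp only [bMatchAt_eq_startswith, List.map_cons, pvUrgentWords, List.any_cons,
        List.any_nil, isIn_cons]
      rw [Bool.eq_iff_iff]
      simp only [Bool.or_eq_true, Bool.or_false]
      tauto

-- ===== VERDICT =====
theorem has_urgent_tone_spec : Claim_equal_has_urgent_tone := by
  intro email _ _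
  unfold Spec_has_urgent_tone has_urgent_tone has_urgent_tone_alt pvUrgentText
  rw [bScan_eq_any, lower_eq_map]
  have h : (" ".toList : List Char) = [' '] := by decide
  rw [h, List.append_assoc, List.singleton_append]
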